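-- pv_equiv track=rewrite | github.com/wwarriner/slurm_status_tools | src/gather/parse.py | _tokenize_scontrol_line
-- ===== SOURCE A (Python) =====
-- from typing import Dict, List, Tuple
--
-- def _tokenize_scontrol_line(_s: str) -> List[Tuple[str, str]]:
--     """
--     Tokenizes one line of output from scontrol -o *. Lines have quasi-flag-style
--     args that look like the following:
--
--     `a=foo b=bar c=hello world d=something=actual value`
--
--     Each token is composed of a field and a value as <field>=<value>. Values are
--     allowed to contain any characters but do not have a leading space. If values
--     were allowed to have leading spaces, tokenization would be impossible.
--
--     Tokenization starts with splitting on spaces. Parts are examined in reverse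
--     order, accumulating parts that do not contain "=". When "=" is found in a
--     part, split on it. The first part is the key. The second part is a piece of
--     the value. All tokens encountered since the last "=", and the second piece
--     of the split, are joined by " " to form the value.
--     """
--
--     DELIMITER = " "
--     SEPARATOR = "="
--     parts = _s.split(DELIMITER)
--     value_accumulator: List[str] = []
--     result: List[Tuple[str, str]] = []
--     for part in reversed(parts):
--         if SEPARATOR not in part:
--             value_accumulator.append(part)
--             continue
--
--         key_rest = part.split(SEPARATOR, 1)
--         key, rest = key_rest[0], key_rest[1]
--
--         value_accumulator.append(rest)
--         value = DELIMITER.join(reversed(value_accumulator))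
--
--         result.append((key, value))
--
--         value_accumulator = []
--     return result
-- ===== SOURCE B (Python) =====
-- from typing import List, Tuple
--
--
-- def _tokenize_scontrol_line(_s: str) -> List[Tuple[str, str]]:
--     """Forward single-pass state machine: keep a pending key and its value
--     fragments; emit a token whenever a new key starts and once at the end;
--     reverse at the end to match the reverse-scan ordering."""
--     result: List[Tuple[str, str]] = []
--     key = None
--     fragments: List[str] = []
--     for part in _s.split(" "):
--         if "=" in part:
--             if key is not None:
--                 result.append((key, " ".join(fragments)))
--             kr = part.split("=", 1)
--             key = kr[0]
--             fragments = [kr[1]]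
--         elif key is not None:
--             fragments.append(part)
--     if key is not None:
--         result.append((key, " ".join(fragments)))
--     result.reverse()
--     return result
-- ===== Notes on version B (the rewrite author's own statement) =====
-- stated objective: alternative
-- what changed: Replaces A's reverse scan with accumulate-then-emit by a forward single-pass state machine that keeps a pending key and its value fragments, flushes a token on each new key and once at the end, and reverses the output list once.
import Mathlib
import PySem

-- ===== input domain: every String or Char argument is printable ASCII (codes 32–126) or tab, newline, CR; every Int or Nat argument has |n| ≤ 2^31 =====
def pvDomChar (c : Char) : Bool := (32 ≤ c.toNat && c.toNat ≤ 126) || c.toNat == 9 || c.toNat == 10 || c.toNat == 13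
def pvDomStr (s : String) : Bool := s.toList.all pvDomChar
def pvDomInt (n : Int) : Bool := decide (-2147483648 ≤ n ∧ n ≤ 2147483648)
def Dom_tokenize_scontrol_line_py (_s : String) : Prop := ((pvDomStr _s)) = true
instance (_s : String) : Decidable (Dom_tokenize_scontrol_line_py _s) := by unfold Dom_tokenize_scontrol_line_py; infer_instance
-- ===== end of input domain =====

-- B replaces A's reverse scan with a forward single-pass state machine (pending key +
-- fragments, flushed on each new key and at the end, output reversed once): alternative
-- decomposition of the same O(n) tokenization, not claimed faster.

-- ===== PORT A =====
-- Literal port of A: split on " ", fold over the REVERSED parts accumulating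
-- value fragments, emit (key, joined reversed accumulator) at each "="-part.
def tokenize_scontrol_line_py (_s : String) : List (String × String) :=
  let parts := (PySem.Str.split? _s " ").getD []
  let st := parts.reverse.foldl
    (fun (st : List String × List (String × String)) part =>
      if PySem.Str.isIn "=" part = false then
        (st.1 ++ [part], st.2)
      else
        let kr := (PySem.Str.splitMax? part "=" 1).getD []
        let key := PySem.List.pyGetD kr 0 ""
        let rest := PySem.List.pyGetD kr 1 ""
        let vacc := st.1 ++ [rest]
        let value := PySem.Str.join " " vacc.reverse
        ([], st.2 ++ [(key, value)]))
    ([], [])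
  st.2

-- ===== PORT B =====
-- Literal port of B (Source B): forward fold with state (pending key, fragments, emitted),
-- final flush of the pending token, then one reversal of the emitted list.
def tokenize_scontrol_line_py_alt (_s : String) : List (String × String) :=
  let st := ((PySem.Str.split? _s " ").getD []).foldl
    (fun (st : Option String × List String × List (String × String)) part =>
      if PySem.Str.isIn "=" part then
        let emitted := match st.1 with
          | some k => st.2.2 ++ [(k, PySem.Str.join " " st.2.1)]
          | none => st.2.2
        let kr := (PySem.Str.splitMax? part "=" 1).getD []
        (some (PySem.List.pyGetD kr 0 ""), [PySem.List.pyGetD kr 1 ""], emitted)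
      else
        match st.1 with
        | some _ => (st.1, st.2.1 ++ [part], st.2.2)
        | none => st)
    (none, [], [])
  let result := match st.1 with
    | some k => st.2.2 ++ [(k, PySem.Str.join " " st.2.1)]
    | none => st.2.2
  result.reverse

-- ===== PRECONDITION & SPEC =====
def Spec_tokenize_scontrol_line_py (_s : String) (out : List (String × String)) : Prop := out = tokenize_scontrol_line_py_alt _s
instance (_s : String) (out : List (String × String)) : Decidable (Spec_tokenize_scontrol_line_py _s out) := by unfold Spec_tokenize_scontrol_line_py; infer_instance

-- ===== CLAIM (what is proved, stated in full; the proofs are below) =====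
def Claim_equal_tokenize_scontrol_line_py : Prop := ∀ (_s : String), Dom_tokenize_scontrol_line_py _s → Spec_tokenize_scontrol_line_py _s (tokenize_scontrol_line_py _s)

-- ===== LEMMAS AND PROOFS =====

-- A's loop step (exactly the lambda in the port of A)
def pvAStep (st : List String × List (String × String)) (part : String) :
    List String × List (String × String) :=
  if PySem.Str.isIn "=" part = false then
    (st.1 ++ [part], st.2)
  else
    let kr := (PySem.Str.splitMax? part "=" 1).getD []
    let key := PySem.List.pyGetD kr 0 ""
    let rest := PySem.List.pyGetD kr 1 ""
    let vacc := st.1 ++ [rest]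
    let value := PySem.Str.join " " vacc.reverse
    ([], st.2 ++ [(key, value)])

-- A's fold over the reversed parts, rephrased as a foldr over the parts
def pvAF (ps : List String) : List String × List (String × String) :=
  ps.foldr (fun part st => pvAStep st part) ([], [])

-- B's loop step (exactly the lambda in the port of B)
def pvBStep (st : Option String × List String × List (String × String)) (part : String) :
    Option String × List String × List (String × String) :=
  if PySem.Str.isIn "=" part then
    let emitted := match st.1 with
      | some k => st.2.2 ++ [(k, PySem.Str.join " " st.2.1)]
      | none => st.2.2
    let kr := (PySem.Str.splitMax? part "=" 1).getD []
    (some (PySem.List.pyGetD kr 0 ""), [PySem.List.pyGetD kr 1 ""], emitted)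
  else
    match st.1 with
    | some _ => (st.1, st.2.1 ++ [part], st.2.2)
    | none => st

def pvBFin (st : Option String × List String × List (String × String)) :
    List (String × String) :=
  match st.1 with
  | some k => st.2.2 ++ [(k, PySem.Str.join " " st.2.1)]
  | none => st.2.2

-- first piece / remainder of part.split("=", 1)
def pvKey (part : String) : String :=
  PySem.List.pyGetD ((PySem.Str.splitMax? part "=" 1).getD []) 0 ""
def pvRest (part : String) : String :=
  PySem.List.pyGetD ((PySem.Str.splitMax? part "=" 1).getD []) 1 ""

-- the pending token of B, phrased against A's leftover accumulator
def pvPend (ok : Option String) (fr : List String) (vacc : List String) :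
    List (String × String) :=
  match ok with
  | some k => [(k, PySem.Str.join " " (fr ++ vacc.reverse))]
  | none => []

lemma pvA_eq (s : String) :
    tokenize_scontrol_line_py s = (pvAF ((PySem.Str.split? s " ").getD [])).2 := by
  show ((((PySem.Str.split? s " ").getD []).reverse).foldl pvAStep ([], [])).2
      = (pvAF ((PySem.Str.split? s " ").getD [])).2
  rw [List.foldl_reverse]
  rfl

lemma pvB_eq (s : String) :
    tokenize_scontrol_line_py_alt s
      = (pvBFin (((PySem.Str.split? s " ").getD []).foldl pvBStep (none, [], []))).reverse := rfl

lemma pvBridge (ps : List String) (ok : Option String) (fr : List String)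
    (res : List (String × String)) :
    (pvBFin (ps.foldl pvBStep (ok, fr, res))).reverse
      = (pvAF ps).2 ++ pvPend ok fr (pvAF ps).1 ++ res.reverse := by
  induction ps generalizing ok fr res with
  | nil => cases ok <;> simp [pvBFin, pvPend, pvAF]
  | cons p ps ih =>
    by_cases h : PySem.Chars.isIn ['='] p.toList = true
    · have hA : pvAF (p :: ps) =
          (([] : List String), (pvAF ps).2 ++
            [(pvKey p, PySem.Str.join " " (((pvAF ps).1 ++ [pvRest p]).reverse))]) := by
        simp [pvAF, pvAStep, pvKey, pvRest, h]
      cases ok with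
      | none =>
        have hstep : pvBStep (none, fr, res) p = (some (pvKey p), [pvRest p], res) := by
          simp [pvBStep, pvKey, pvRest, h]
        rw [List.foldl_cons, hstep, ih, hA]
        simp [pvPend, List.append_assoc]
      | some k =>
        have hstep : pvBStep (some k, fr, res) p
            = (some (pvKey p), [pvRest p], res ++ [(k, PySem.Str.join " " fr)]) := by
          simp [pvBStep, pvKey, pvRest, h]
        rw [List.foldl_cons, hstep, ih, hA]
        simp [pvPend, List.append_assoc]
    · have h0 : PySem.Chars.isIn ['='] p.toList = false := by simpa using h
      have hA : pvAF (p :: ps) = ((pvAF ps).1 ++ [p], (pvAF ps).2) := by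
        simp [pvAF, pvAStep, h0]
      cases ok with
      | none =>
        have hstep : pvBStep (none, fr, res) p = (none, fr, res) := by
          simp [pvBStep, h0]
        rw [List.foldl_cons, hstep, ih, hA]
        simp [pvPend]
      | some k =>
        have hstep : pvBStep (some k, fr, res) p = (some k, fr ++ [p], res) := by
          simp [pvBStep, h0]
        rw [List.foldl_cons, hstep, ih, hA]
        simp [pvPend, List.append_assoc]

-- ===== VERDICT (by name: the statement is the Claim_ definition above) =====
theorem tokenize_scontrol_line_py_spec : Claim_equal_tokenize_scontrol_line_py := by
  intro s _
  unfold Spec_tokenize_scontrol_line_py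
  rw [pvA_eq, pvB_eq, pvBridge]
  simp [pvPend]
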